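-- pv_equiv track=rewrite | github.com/iivanii/Patrones | patrones.py | encuentra_patron
-- ===== SOURCE A (Python) =====
-- def encuentra_patron(secuencia:str)->str:
--     patron=""
--     primer_iteracion=True
--     for inumero in range(len(secuencia)):
--         if primer_iteracion:
--             patron=patron + secuencia[inumero]
--             primer_iteracion=False
--             continue
--         if patron == secuencia[inumero:len(secuencia)][0:len(patron)]:
--             return patron
--         else:
--             patron=patron + secuencia[inumero]
--
--     return patron
-- ===== SOURCE B (Python) =====
-- def encuentra_patron(secuencia: str) -> str:
--     # Z-algorithm: z[i] = length of the longest common prefix of secuencia and secuencia[i:].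
--     # The smallest prefix that immediately repeats is the smallest i with z[i] >= i.
--     n = len(secuencia)
--     z = [0] * n
--     l = 0
--     r = 0
--     for i in range(1, n):
--         k = min(r - i, z[i - l]) if i < r else 0
--         while i + k < n and secuencia[k] == secuencia[i + k]:
--             k += 1
--         z[i] = k
--         if i + k > r:
--             l = i
--             r = i + k
--     for i in range(1, n // 2 + 1):
--         if z[i] >= i:
--             return secuencia[:i]
--     return secuencia
-- ===== Notes on version B (the rewrite author's own statement) =====
-- stated objective: faster
-- what changed: A grows a pattern accumulator and compares it against a freshly built slice of the remainder at every position; B instead computes the full Z-array in one left-to-right pass with the classic z-box (l, r) two-pointer reuse, then separately returns the prefix of the smallest i with z[i] >= i.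
import Mathlib
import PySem

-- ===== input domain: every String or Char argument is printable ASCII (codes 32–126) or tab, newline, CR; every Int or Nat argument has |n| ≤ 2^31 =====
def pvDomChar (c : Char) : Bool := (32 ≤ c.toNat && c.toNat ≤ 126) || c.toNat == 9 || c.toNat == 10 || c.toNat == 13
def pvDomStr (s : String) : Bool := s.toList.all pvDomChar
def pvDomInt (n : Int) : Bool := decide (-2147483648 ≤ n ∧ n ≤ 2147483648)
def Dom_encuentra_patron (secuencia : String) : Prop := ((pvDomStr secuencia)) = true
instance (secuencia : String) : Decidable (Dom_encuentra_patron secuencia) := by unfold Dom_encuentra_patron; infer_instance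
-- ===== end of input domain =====

-- B replaces A's growing-pattern scan (rebuilding and comparing string slices each step) by the
-- Z-algorithm: one pass computing the Z-array with a z-box, then the smallest i with z[i] >= i;
-- objective: faster (asymptotic, O(n) vs A's O(n^2)).

-- ===== PORT A =====
-- A's loop: state (patron, primer_iteracion), early return on the slice comparison.
-- secuencia[inumero] is always in range (inumero ∈ range(len)), so pyGetD's default ' ' is never used.
def pvLoopA (cs : List Char) : List Int → List Char → Bool → List Char
  | [], patron, _ => patron
  | i :: rest, patron, first =>
    if first then
      pvLoopA cs rest (patron ++ [PySem.List.pyGetD cs i ' ']) false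
    else if patron = PySem.List.slice (PySem.List.slice cs (some i) (some (cs.length : Int))) (some 0) (some ((patron.length : Nat) : Int)) then
      patron
    else
      pvLoopA cs rest (patron ++ [PySem.List.pyGetD cs i ' ']) false

def encuentra_patron (secuencia : String) : String :=
  String.ofList (pvLoopA secuencia.toList (PySem.List.pyRange 0 (secuencia.toList.length : Int) 1) [] true)

-- ===== PORT B =====
-- B's inner while loop: 'while i + k < n and secuencia[k] == secuencia[i+k]: k += 1'.
-- Both indices are in range whenever the guard's first conjunct holds (k ≤ i + k < n), so
-- Python's s[k] is exactly List.getD here.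
def pvZext (cs : List Char) (i : Nat) (k : Nat) : Nat :=
  if h : i + k < cs.length ∧ cs.getD k ' ' = cs.getD (i + k) ' ' then
    pvZext cs i (k + 1)
  else k
termination_by cs.length - (i + k)
decreasing_by omega

-- B's main for-loop over i in range(1, n): state (z, l, r); k0 is Python's
-- 'min(r - i, z[i - l]) if i < r else 0' (both subtractions are on naturals with i < r, l ≤ i).
def pvZloop (cs : List Char) : List Nat → List Nat × Nat × Nat → List Nat × Nat × Nat
  | [], st => st
  | i :: rest, (z, l, r) =>
    let k0 := if i < r then min (r - i) (z.getD (i - l) 0) else 0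
    let k := pvZext cs i k0
    let z' := z.set i k
    if r < i + k then pvZloop cs rest (z', i, i + k)
    else pvZloop cs rest (z', l, r)

def encuentra_patron_alt (secuencia : String) : String :=
  let cs := secuencia.toList
  let n := cs.length
  let st := pvZloop cs (List.range' 1 (n - 1)) (List.replicate n 0, 0, 0)
  -- second loop: first i in range(1, n//2 + 1) with z[i] >= i, returning secuencia[:i]
  match (List.range' 1 (n / 2)).find? (fun i => decide (i ≤ st.1.getD i 0)) with
  | some i => String.ofList (cs.take i)
  | none => secuencia

-- ===== PRECONDITION & SPEC =====
def Spec_encuentra_patron (secuencia : String) (out : String) : Prop := out = encuentra_patron_alt secuencia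
instance (secuencia : String) (out : String) : Decidable (Spec_encuentra_patron secuencia out) := by unfold Spec_encuentra_patron; infer_instance

-- ===== CLAIM (what is proved, stated in full; the proofs are below) =====
def Claim_equal_encuentra_patron : Prop := ∀ (secuencia : String), Dom_encuentra_patron secuencia → Spec_encuentra_patron secuencia (encuentra_patron secuencia)

-- ===== LEMMAS AND PROOFS =====

-- "the prefix of length i immediately repeats"
def pvGood (cs : List Char) (i : Nat) : Bool := cs.take i == (cs.drop i).take i

theorem pv_find?_congr {α : Type} (l : List α) (p q : α → Bool)
    (h : ∀ a ∈ l, p a = q a) : l.find? p = l.find? q := by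
  induction l with
  | nil => rfl
  | cons a l ih =>
    simp only [List.find?_cons]
    rw [h a (by simp)]
    cases q a with
    | true => rfl
    | false => exact ih (fun b hb => h b (by simp [hb]))

-- A's slice condition at index j (with patron = cs.take j, j ≤ n) is pvGood cs j
theorem pv_condA (cs : List Char) (j : Nat) (hj : j ≤ cs.length) :
    (cs.take j = PySem.List.slice (PySem.List.slice cs (some (j : Int)) (some (cs.length : Int)))
        (some 0) (some (((cs.take j).length : Nat) : Int)))
      ↔ pvGood cs j = true := by
  have hlen : (cs.take j).length = j := by simp [hj]
  rw [hlen]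
  rw [PySem.List.slice_natCast]
  have hdrop : (cs.drop j).take (cs.length - j) = cs.drop j := by
    apply List.take_of_length_le; simp
  rw [hdrop]
  rw [PySem.List.slice_zero_start, PySem.List.slice_to_natCast]
  simp [pvGood]

theorem pv_loopA_search (cs : List Char) : ∀ (m j : Nat), 1 ≤ j → j + m = cs.length →
    pvLoopA cs (PySem.List.pyRange (j : Int) (cs.length : Int) 1) (cs.take j) false
      = (match (List.range' j m).find? (pvGood cs) with
         | some i => cs.take i
         | none => cs) := by
  intro m
  induction m with
  | zero =>
    intro j _ hj
    have : PySem.List.pyRange (j : Int) (cs.length : Int) 1 = [] := by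
      rw [PySem.List.pyRange_one]
      simp [← hj]
    rw [this]
    simp [pvLoopA, ← hj]
  | succ m ih =>
    intro j h1 hj
    have hlt : (j : Int) < (cs.length : Int) := by omega
    rw [PySem.List.pyRange_one_cons hlt]
    show (if cs.take j = _ then _ else _) = _
    rw [List.range'_succ, List.find?_cons]
    by_cases hg : pvGood cs j = true
    · rw [if_pos ((pv_condA cs j (by omega)).mpr hg), hg]
    · rw [if_neg (fun hc => hg ((pv_condA cs j (by omega)).mp hc))]
      rw [Bool.not_eq_true] at hg
      rw [hg]
      have hjlt : j < cs.length := by omega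
      have hstep : cs.take j ++ [PySem.List.pyGetD cs (j : Int) ' '] = cs.take (j + 1) := by
        rw [PySem.List.pyGetD_natCast, List.getD_eq_getElem cs ' ' hjlt]
        rw [List.take_add_one]
        simp [hjlt]
      have hcast : (j : Int) + 1 = ((j + 1 : Nat) : Int) := by omega
      rw [hstep, hcast]
      exact ih (j + 1) (by omega) (by omega)

theorem pv_A_eq (s : String) :
    encuentra_patron s
      = String.ofList (match (List.range' 1 (s.toList.length - 1)).find? (pvGood s.toList) with
         | some i => s.toList.take i
         | none => s.toList) := by
  unfold encuentra_patron
  cases hcs : s.toList with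
  | nil => simp [pvLoopA]
  | cons c cs' =>
    have hn : 1 ≤ (c :: cs').length := by simp
    have hlt : (0 : Int) < ((c :: cs').length : Int) := by exact_mod_cast hn
    rw [PySem.List.pyRange_one_cons hlt]
    show String.ofList (pvLoopA _ _ ([] ++ [PySem.List.pyGetD (c :: cs') 0 ' ']) false) = _
    have h0 : ([] : List Char) ++ [PySem.List.pyGetD (c :: cs') 0 ' '] = (c :: cs').take 1 := by
      simp [PySem.List.pyGetD_zero_cons]
    rw [h0]
    have : ((0 : Int) + 1) = ((1 : Nat) : Int) := by norm_num
    rw [this, pv_loopA_search (c :: cs') ((c :: cs').length - 1) 1 (by omega) (by omega)]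

-- pvGood is false beyond n/2 (the repeated slice is then shorter than the prefix)
theorem pv_good_false (cs : List Char) (i : Nat) (h1 : i ≤ cs.length) (h2 : cs.length < 2 * i) :
    pvGood cs i = false := by
  unfold pvGood
  rw [beq_eq_false_iff_ne]
  intro h
  have := congrArg List.length h
  simp at this
  omega

theorem pv_range_bridge (cs : List Char) :
    (List.range' 1 (cs.length - 1)).find? (pvGood cs)
      = (List.range' 1 (cs.length / 2)).find? (pvGood cs) := by
  set n := cs.length with hn
  by_cases h0 : n = 0
  · simp [h0]
  · have hsplit : List.range' 1 (n - 1) = List.range' 1 (n / 2) ++ List.range' (1 + n / 2) ((n - 1) - n / 2) := by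
      have h : List.range' 1 (n/2) ++ List.range' (1 + 1 * (n/2)) ((n-1) - n/2)
          = List.range' 1 (n/2 + ((n-1) - n/2)) := List.range'_append
      simp only [one_mul] at h
      rw [h]
      congr 1
      omega
    rw [hsplit, List.find?_append]
    have htail : (List.range' (1 + n / 2) ((n - 1) - n / 2)).find? (pvGood cs) = none := by
      rw [List.find?_eq_none]
      intro x hx
      simp only [List.mem_range'_1] at hx
      rw [pv_good_false cs x (by omega) (by omega)]
      simp
    rw [htail]
    simp

-- ===== B-side lemmas: correctness of the Z-algorithm =====

-- "the first k characters of cs and of cs.drop i agree" (pointwise form)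
def pvGoodP (cs : List Char) (i k : Nat) : Prop :=
  i + k ≤ cs.length ∧ ∀ j < k, cs.getD j ' ' = cs.getD (i + j) ' '

-- the while-loop's stopping condition
def pvStop (cs : List Char) (i k : Nat) : Prop :=
  ¬ (i + k < cs.length ∧ cs.getD k ' ' = cs.getD (i + k) ' ')

-- the true longest common prefix of cs and cs.drop i (as computed by the while loop from 0)
def pvLcp (cs : List Char) (i : Nat) : Nat := pvZext cs i 0

theorem pv_zext_spec (cs : List Char) (i : Nat) :
    ∀ k, pvGoodP cs i k → pvGoodP cs i (pvZext cs i k) ∧ pvStop cs i (pvZext cs i k) := by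
  intro k hk
  induction k using pvZext.induct cs i with
  | case1 k h ih =>
    rw [pvZext, dif_pos h]
    apply ih
    refine ⟨by omega, fun j hj => ?_⟩
    rcases Nat.lt_succ_iff_lt_or_eq.mp hj with h' | h'
    · exact hk.2 j h'
    · subst h'; exact h.2
  | case2 k h =>
    rw [pvZext, dif_neg h]
    exact ⟨hk, h⟩

theorem pv_stop_unique (cs : List Char) (i : Nat) (j j' : Nat)
    (hj : pvGoodP cs i j) (hsj : pvStop cs i j)
    (hj' : pvGoodP cs i j') (hsj' : pvStop cs i j') : j = j' := by
  have h1 := hj.1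
  have h1' := hj'.1
  rcases Nat.lt_trichotomy j j' with h | h | h
  · exact absurd ⟨by omega, hj'.2 j h⟩ hsj
  · exact h
  · exact absurd ⟨by omega, hj.2 j' h⟩ hsj'

theorem pv_zext_eq_lcp (cs : List Char) (i k : Nat) (hi : i ≤ cs.length)
    (hk : pvGoodP cs i k) : pvZext cs i k = pvLcp cs i := by
  have h1 := pv_zext_spec cs i k hk
  have h2 := pv_zext_spec cs i 0 ⟨by omega, by omega⟩
  exact pv_stop_unique cs i _ _ h1.1 h1.2 h2.1 h2.2

theorem pv_good_iff_pointwise (cs : List Char) (i : Nat) (h2 : 2 * i ≤ cs.length) :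
    pvGood cs i = true ↔ ∀ j < i, cs.getD j ' ' = cs.getD (i + j) ' ' := by
  unfold pvGood
  rw [beq_iff_eq]
  constructor
  · intro h j hj
    have h1 : (cs.take i)[j]? = ((cs.drop i).take i)[j]? := by rw [h]
    rw [List.getElem?_take, List.getElem?_take] at h1
    simp only [hj, if_pos, List.getElem?_drop] at h1
    rw [List.getElem?_eq_getElem (by omega : j < cs.length),
        List.getElem?_eq_getElem (by omega : i + j < cs.length)] at h1
    rw [List.getD_eq_getElem cs ' ' (by omega), List.getD_eq_getElem cs ' ' (by omega)]
    simpa using h1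
  · intro h
    apply List.ext_getElem
    · simp; omega
    · intro j hj1 hj2
      have hji : j < i := by simp at hj1; omega
      have := h j hji
      rw [List.getD_eq_getElem cs ' ' (by omega), List.getD_eq_getElem cs ' ' (by omega)] at this
      simpa using this

theorem pv_lcp_ge_iff (cs : List Char) (i : Nat) (h1 : 1 ≤ i) (h2 : 2 * i ≤ cs.length) :
    (i ≤ pvLcp cs i) ↔ pvGood cs i = true := by
  have hspec := pv_zext_spec cs i 0 ⟨by omega, by omega⟩
  rw [pv_good_iff_pointwise cs i h2]
  unfold pvLcp
  constructor
  · intro hle j hj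
    exact hspec.1.2 j (by omega)
  · intro h
    rcases Nat.lt_or_ge (pvZext cs i 0) i with hlt | hge
    · exact absurd ⟨by omega, h _ hlt⟩ hspec.2
    · exact hge

-- main invariant of the z-box loop: all computed entries are true lcp values
theorem pv_zloop_inv (cs : List Char) : ∀ (m i : Nat) (z : List Nat) (l r : Nat),
    1 ≤ i → i + m = cs.length →
    z.length = cs.length →
    (∀ j, 1 ≤ j → j < i → z.getD j 0 = pvLcp cs j) →
    l < i → r ≤ l + pvLcp cs l → r ≤ cs.length → (1 ≤ l ∨ r = 0) →
    ∀ j, 1 ≤ j → j < cs.length →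
      (pvZloop cs (List.range' i m) (z, l, r)).1.getD j 0 = pvLcp cs j := by
  intro m
  induction m with
  | zero =>
    intro i z l r h1 hm hz hdone _ _ _ _ j hj1 hj2
    simp only [List.range'_zero, pvZloop]
    exact hdone j hj1 (by omega)
  | succ m ih =>
    intro i z l r h1 hm hz hdone hl hr hrn hl1 j hj1 hj2
    rw [List.range'_succ]
    show (pvZloop cs (i :: List.range' (i+1) m) (z, l, r)).1.getD j 0 = pvLcp cs j
    have hin : i < cs.length := by omega
    -- the starting value k0 is a valid common-prefix length
    have hk0 : pvGoodP cs i (if i < r then min (r - i) (z.getD (i - l) 0) else 0) := by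
      split_ifs with hir
      · -- i < r: the z-box gives min (r-i) (z[i-l]) matching characters
        have hlpos : 1 ≤ l := by rcases hl1 with h | h; exact h; omega
        have hd1 : 1 ≤ i - l := by omega
        have hd2 : i - l < i := by omega
        have hzd : z.getD (i - l) 0 = pvLcp cs (i - l) := hdone _ hd1 hd2
        rw [hzd]
        have hGl := (pv_zext_spec cs l 0 ⟨by omega, by omega⟩).1
        have hGd := (pv_zext_spec cs (i - l) 0 ⟨by omega, by omega⟩).1
        have hlcp_l : pvLcp cs l = pvZext cs l 0 := rfl
        have hlcp_d : pvLcp cs (i - l) = pvZext cs (i - l) 0 := rfl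
        have hGl1 := hGl.1
        have hGd1 := hGd.1
        refine ⟨by omega, fun j' hj' => ?_⟩
        have e1 : cs.getD j' ' ' = cs.getD ((i - l) + j') ' ' :=
          hGd.2 j' (by omega)
        have e2 : cs.getD ((i - l) + j') ' ' = cs.getD (l + ((i - l) + j')) ' ' :=
          hGl.2 ((i - l) + j') (by omega)
        have e3 : l + ((i - l) + j') = i + j' := by omega
        rw [e1, e2, e3]
      · exact ⟨by omega, by omega⟩
    have hk : pvZext cs i (if i < r then min (r - i) (z.getD (i - l) 0) else 0) = pvLcp cs i :=
      pv_zext_eq_lcp cs i _ (by omega) hk0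
    have hLn : i + pvLcp cs i ≤ cs.length :=
      (pv_zext_spec cs i 0 ⟨by omega, by omega⟩).1.1
    -- the updated array
    have hz'len : (z.set i (pvLcp cs i)).length = cs.length := by simpa using hz
    have hz'done : ∀ j', 1 ≤ j' → j' < i + 1 →
        (z.set i (pvLcp cs i)).getD j' 0 = pvLcp cs j' := by
      intro j' hj'1 hj'2
      rcases Nat.lt_succ_iff_lt_or_eq.mp hj'2 with h' | h'
      · rw [List.getD_eq_getElem?_getD, List.getElem?_set_ne (by omega),
            ← List.getD_eq_getElem?_getD]
        exact hdone j' hj'1 h'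
      · subst h'
        rw [List.getD_eq_getElem?_getD, List.getElem?_set_self (by omega)]
        rfl
    simp only [pvZloop, hk]
    split_ifs with hbox
    · exact ih (i + 1) _ i (i + pvLcp cs i) (by omega) (by omega) hz'len hz'done
        (by omega) (le_refl _) hLn (by omega) j hj1 hj2
    · exact ih (i + 1) _ l r (by omega) (by omega) hz'len hz'done
        (by omega) hr hrn hl1 j hj1 hj2

theorem pv_B_eq (s : String) :
    encuentra_patron_alt s
      = String.ofList (match (List.range' 1 (s.toList.length / 2)).find? (pvGood s.toList) with
         | some i => s.toList.take i
         | none => s.toList) := by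
  unfold encuentra_patron_alt
  dsimp only
  set cs := s.toList with hcs
  set n := cs.length with hn
  have hcong : (List.range' 1 (n / 2)).find?
        (fun i => decide (i ≤ (pvZloop cs (List.range' 1 (n - 1)) (List.replicate n 0, 0, 0)).1.getD i 0))
      = (List.range' 1 (n / 2)).find? (pvGood cs) := by
    apply pv_find?_congr
    intro a ha
    simp only [List.mem_range'_1] at ha
    have hn2 : 2 ≤ n := by omega
    have ha2 : 2 * a ≤ n := by omega
    have hinv := pv_zloop_inv cs (n - 1) 1 (List.replicate n 0) 0 0
      (le_refl 1) (by omega) (by simpa using hn.symm) (by omega) (by omega) (by omega)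
      (by omega) (Or.inr rfl)
    show decide (a ≤ (pvZloop cs (List.range' 1 (n - 1)) (List.replicate n 0, 0, 0)).1.getD a 0) = pvGood cs a
    rw [hinv a (by omega) (by omega)]
    rcases hb : pvGood cs a with _ | _
    · simp only [decide_eq_false_iff_not]
      intro hle
      exact absurd ((pv_lcp_ge_iff cs a (by omega) ha2).mp hle) (by simp [hb])
    · simp only [decide_eq_true_eq]
      exact (pv_lcp_ge_iff cs a (by omega) ha2).mpr hb
  rw [hcong]
  cases hfind : (List.range' 1 (n / 2)).find? (pvGood cs) with
  | none => simp [hcs]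
  | some i => rfl

-- ===== VERDICT (by name: the statement is the Claim_ definition above) =====
theorem encuentra_patron_spec : Claim_equal_encuentra_patron := by
  intro s _
  unfold Spec_encuentra_patron
  rw [pv_A_eq, pv_B_eq, pv_range_bridge]
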